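-- pv_equiv track=rewrite | github.com/mild4112/01204111-ComPro63 | Elab-12/12-02.py | checkgrade
-- ===== SOURCE A (Python) =====
-- def checkgrade(puretable):
-- 	a=True
-- 	b=True
-- 	for i in range(len(puretable)):
-- 		for j in range(len(puretable[i])):
-- 			if puretable[i][j]<85:
-- 				a=False
-- 			if puretable[i][j]<70:
-- 				b=False
-- 			if puretable[i][j]<60:
-- 				return "nograde"
-- 	if a==True:
-- 		return "a"
-- 	elif b==True:
-- 		return "b"
-- 	else:
-- 		return "c"
-- ===== SOURCE B (Python) =====
-- def checkgrade(puretable):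
--     m = min((x for row in puretable for x in row), default=100)
--     if m < 60:
--         return "nograde"
--     if m >= 85:
--         return "a"
--     if m >= 70:
--         return "b"
--     return "c"
-- ===== Notes on version B (the rewrite author's own statement) =====
-- stated objective: simpler
-- what changed: Replaces the two boolean flags and the early-return nested scan with a single global minimum (min with default=100) followed by a closed-form threshold branch.
import Mathlib
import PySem

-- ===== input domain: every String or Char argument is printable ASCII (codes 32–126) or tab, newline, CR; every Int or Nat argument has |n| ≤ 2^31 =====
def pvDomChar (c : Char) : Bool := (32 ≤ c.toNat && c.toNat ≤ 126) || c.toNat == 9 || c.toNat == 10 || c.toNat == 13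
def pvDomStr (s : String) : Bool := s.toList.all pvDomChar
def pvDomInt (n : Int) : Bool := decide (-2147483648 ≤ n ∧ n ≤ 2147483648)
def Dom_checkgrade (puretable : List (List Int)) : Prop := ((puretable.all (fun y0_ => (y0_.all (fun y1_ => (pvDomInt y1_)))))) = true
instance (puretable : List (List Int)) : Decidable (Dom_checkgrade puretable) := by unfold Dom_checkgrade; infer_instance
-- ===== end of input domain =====

-- B is simpler: it replaces A's two boolean flags and early-return nested scan by one
-- global minimum (min with default=100) followed by a closed-form threshold branch.

-- ===== PORT A =====
-- inner loop over one row: updates the flags a, b; early return "nograde" on < 60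
def checkgradeRow : List Int → Bool → Bool → (Bool × Bool) ⊕ String
  | [], a, b => Sum.inl (a, b)
  | x :: xs, a, b =>
    let a := if x < 85 then false else a
    let b := if x < 70 then false else b
    if x < 60 then Sum.inr "nograde" else checkgradeRow xs a b

-- outer loop over the rows, then A's final if/elif/else on the flags
def checkgradeRows : List (List Int) → Bool → Bool → String
  | [], a, b => if a then "a" else if b then "b" else "c"
  | row :: rest, a, b =>
    match checkgradeRow row a b with
    | Sum.inl (a', b') => checkgradeRows rest a' b'
    | Sum.inr s => s

def checkgrade (puretable : List (List Int)) : String :=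
  checkgradeRows puretable true true

-- ===== PORT B =====
def checkgrade_alt (puretable : List (List Int)) : String :=
  let m := (PySem.List.min? (puretable.flatMap id) (fun x => x)).getD 100
  if m < 60 then "nograde"
  else if m ≥ 85 then "a"
  else if m ≥ 70 then "b"
  else "c"

-- ===== PRECONDITION & SPEC =====
def Spec_checkgrade (puretable : List (List Int)) (out : String) : Prop := out = checkgrade_alt puretable
instance (puretable : List (List Int)) (out : String) : Decidable (Spec_checkgrade puretable out) := by unfold Spec_checkgrade; infer_instance

-- ===== CLAIM (what is proved, stated in full; the proofs are below) =====
def Claim_equal_checkgrade : Prop := ∀ (puretable : List (List Int)), Dom_checkgrade puretable → Spec_checkgrade puretable (checkgrade puretable)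

-- ===== LEMMAS AND PROOFS =====

theorem checkgradeRow_eq (row : List Int) (a b : Bool) :
    checkgradeRow row a b =
      if row.any (fun x => decide (x < 60)) then Sum.inr "nograde"
      else Sum.inl (a && row.all (fun x => decide (85 ≤ x)), b && row.all (fun x => decide (70 ≤ x))) := by
  induction row generalizing a b with
  | nil => simp [checkgradeRow]
  | cons x xs ih =>
    simp only [checkgradeRow, List.any_cons, List.all_cons]
    by_cases h60 : x < 60
    · simp [h60]
    · rw [if_neg h60, ih]
      have hd : decide (x < 60) = false := decide_eq_false h60
      have e1 : ∀ (c : Int) (flag t : Bool),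
          ((if x < c then false else flag) && t) = (flag && (decide (c ≤ x) && t)) := by
        intro c flag t
        by_cases h : x < c
        · simp [h, show ¬ c ≤ x by omega]
        · simp [h, show c ≤ x by omega]
      by_cases hrest : xs.any (fun x => decide (x < 60)) = true
      · simp [hrest, hd]
      · simp only [Bool.not_eq_true] at hrest
        simp only [hrest, hd, Bool.or_false, Bool.false_eq_true, if_false]
        rw [e1 85, e1 70]

theorem checkgradeRows_eq (rows : List (List Int)) (a b : Bool) :
    checkgradeRows rows a b =
      (if (rows.flatMap id).any (fun x => decide (x < 60)) then "nograde"
      else if a && (rows.flatMap id).all (fun x => decide (85 ≤ x)) then "a"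
      else if b && (rows.flatMap id).all (fun x => decide (70 ≤ x)) then "b"
      else "c") := by
  induction rows generalizing a b with
  | nil => simp [checkgradeRows]
  | cons row rest ih =>
    simp only [checkgradeRows, checkgradeRow_eq]
    by_cases h : row.any (fun x => decide (x < 60)) = true
    · simp [h, List.flatMap_cons]
    · simp only [Bool.not_eq_true] at h
      simp only [h, Bool.false_eq_true, if_false]
      rw [ih]
      simp only [List.flatMap_cons, List.any_append, List.all_append, id_eq, h,
        Bool.false_or, Bool.and_assoc]

theorem checkgrade_eq_alt (puretable : List (List Int)) :
    checkgrade puretable = checkgrade_alt puretable := by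
  unfold checkgrade checkgrade_alt
  rw [checkgradeRows_eq]
  set xs := puretable.flatMap id with hxs
  rcases hx : PySem.List.min? xs (fun x => x) with _ | m
  · have hnil : xs = [] := (PySem.List.min?_eq_none_iff xs (fun x => x)).mp hx
    simp [hnil]

  · have hmem : m ∈ xs := PySem.List.min?_mem hx
    have hmin : ∀ y ∈ xs, m ≤ y := PySem.List.min?_isMin hx
    have hany : xs.any (fun x => decide (x < 60)) = decide (m < 60) := by
      by_cases h : m < 60
      · simp only [decide_eq_true h]
        exact List.any_eq_true.mpr ⟨m, hmem, decide_eq_true h⟩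
      · simp only [decide_eq_false h]
        refine List.any_eq_false.mpr ?_
        intro x hxm
        have := hmin x hxm
        simp
        omega
    have hall : ∀ c : Int, xs.all (fun x => decide (c ≤ x)) = decide (c ≤ m) := by
      intro c
      by_cases h : c ≤ m
      · simp only [decide_eq_true h]
        refine List.all_eq_true.mpr ?_
        intro x hxm
        have := hmin x hxm
        simp only [decide_eq_true_eq]
        omega
      · simp only [decide_eq_false h]
        exact List.all_eq_false.mpr ⟨m, hmem, by simp; omega⟩
    simp only [Option.getD_some, hany, hall, Bool.true_and, decide_eq_true_eq, ge_iff_le]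

-- ===== VERDICT (by name: the statement is the Claim_ definition above) =====
theorem checkgrade_spec : Claim_equal_checkgrade := by
  intro p _
  unfold Spec_checkgrade
  exact checkgrade_eq_alt p
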